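-- pv_equiv track=rewrite | github.com/RahafJannuod/python-exercises | exercise3.py | upperlower3
-- ===== SOURCE A (Python) =====
-- def upperlower3(text):
--     isupperiteration = True
--     mystr = ""
--     for i in text:
--
--         if isupperiteration:
--             mystr+=i.upper()
--         else:
--             mystr+=i.lower()
--         isupperiteration= not isupperiteration
--     return mystr
-- ===== SOURCE B (Python) =====
-- def upperlower3(text):
--     # Pair-wise consumption: take characters two at a time (upper, lower),
--     # instead of toggling a case flag per character.
--     it = iter(text)
--     chunks = []
--     for a in it:
--         b = next(it, '')
--         chunks.append(a.upper() + b.lower())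
--     return ''.join(chunks)
-- ===== Notes on version B (the rewrite author's own statement) =====
-- stated objective: alternative
-- what changed: Replaces the boolean case-toggle accumulator loop with stateless pair-wise consumption: an iterator yields characters two at a time (first uppered, second lowered) and the chunks are joined once.
import Mathlib
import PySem

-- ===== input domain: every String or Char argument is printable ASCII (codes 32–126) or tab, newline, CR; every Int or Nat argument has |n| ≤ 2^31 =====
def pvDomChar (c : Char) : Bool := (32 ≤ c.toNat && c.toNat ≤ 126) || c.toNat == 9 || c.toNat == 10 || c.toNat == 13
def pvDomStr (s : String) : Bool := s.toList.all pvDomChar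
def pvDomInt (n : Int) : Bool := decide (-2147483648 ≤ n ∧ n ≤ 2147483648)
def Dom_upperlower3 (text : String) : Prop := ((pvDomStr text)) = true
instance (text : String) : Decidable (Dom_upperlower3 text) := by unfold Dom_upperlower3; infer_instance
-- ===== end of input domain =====

-- B replaces A's boolean case-toggle loop with stateless pair-wise consumption
-- (upper,lower) two characters at a time; exact equivalence is proved for all strings.


-- ===== PORT A =====
-- for-loop over the characters with the (isupperiteration, mystr) state, string kept as List Char
def upperlower3 (text : String) : String :=
  let st := text.toList.foldl
    (fun (st : Bool × List Char) (i : Char) =>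
      if st.1 then (!st.1, st.2 ++ [PySem.Chars.upperChar i])
      else (!st.1, st.2 ++ [PySem.Chars.lowerChar i]))
    (true, [])
  String.ofList st.2

-- ===== PORT B =====
-- pair-wise consumption: upper the first of each pair, lower the second (a lone trailing char is uppered)
def pvPairUL : List Char → List Char
  | [] => []
  | [a] => [PySem.Chars.upperChar a]
  | a :: b :: r => PySem.Chars.upperChar a :: PySem.Chars.lowerChar b :: pvPairUL r

def upperlower3_alt (text : String) : String :=
  String.ofList (pvPairUL text.toList)

-- ===== PRECONDITION & SPEC =====
def Spec_upperlower3 (text : String) (out : String) : Prop := out = upperlower3_alt text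
instance (text : String) (out : String) : Decidable (Spec_upperlower3 text out) := by unfold Spec_upperlower3; infer_instance

-- ===== CLAIM (what is proved, stated in full; the proofs are below) =====
def Claim_equal_upperlower3 : Prop := ∀ (text : String), Dom_upperlower3 text → Spec_upperlower3 text (upperlower3 text)

-- ===== LEMMAS AND PROOFS =====

-- the lowercase-first twin of pvPairUL (proof helper only)
def pvPairLU : List Char → List Char
  | [] => []
  | [a] => [PySem.Chars.lowerChar a]
  | a :: b :: r => PySem.Chars.lowerChar a :: PySem.Chars.upperChar b :: pvPairLU r

theorem pvPair_cons (l : List Char) :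
    (∀ a, pvPairUL (a :: l) = PySem.Chars.upperChar a :: pvPairLU l) ∧
    (∀ a, pvPairLU (a :: l) = PySem.Chars.lowerChar a :: pvPairUL l) := by
  induction l with
  | nil => exact ⟨fun a => rfl, fun a => rfl⟩
  | cons x l ih =>
    exact ⟨fun a => by rw [pvPairUL, (ih).2 x],
           fun a => by rw [pvPairLU, (ih).1 x]⟩

theorem pvFold_eq (l : List Char) :
    ∀ (b : Bool) (s : List Char),
      (l.foldl
        (fun (st : Bool × List Char) (i : Char) =>
          if st.1 then (!st.1, st.2 ++ [PySem.Chars.upperChar i])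
          else (!st.1, st.2 ++ [PySem.Chars.lowerChar i]))
        (b, s)).2 = s ++ (if b then pvPairUL l else pvPairLU l) := by
  induction l with
  | nil => intro b s; simp [pvPairUL, pvPairLU]
  | cons a l ih =>
    intro b s
    cases b with
    | true =>
      simp only [List.foldl_cons, Bool.not_true, if_pos]
      rw [ih false (s ++ [PySem.Chars.upperChar a])]
      simp [(pvPair_cons l).1 a]
    | false =>
      simp only [List.foldl_cons, Bool.not_false, Bool.false_eq_true, ite_false]
      rw [ih true (s ++ [PySem.Chars.lowerChar a])]
      simp [(pvPair_cons l).2 a]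

-- ===== VERDICT (by name: the statement is the Claim_ definition above) =====
theorem upperlower3_spec : Claim_equal_upperlower3 := by
  intro text _
  unfold Spec_upperlower3 upperlower3 upperlower3_alt
  show String.ofList _ = _
  rw [pvFold_eq text.toList true []]
  simp
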